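-- pv_equiv track=rewrite | github.com/MuhammadTausif/code-signal | arcade/1. Intro (60)/5. Island of Knowledge/22- avoidObstacles.py | solution
-- ===== SOURCE A (Python) =====
-- def solution(inputArray):
--     found = False
--     i = 1
--     while not found:
--         if any(num%i==0 for num in inputArray):
--             i+=1
--         else:
--             found = True
--     return i
-- ===== SOURCE B (Python) =====
-- def solution(inputArray):
--     # Precompute every "bad" step size (any divisor of any obstacle),
--     # then scan upward for the first step size that is not bad.
--     bad = set()
--     for num in inputArray:
--         n = abs(num)
--         d = 1
--         while d * d <= n:
--             if n % d == 0:
--                 bad.add(d)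
--                 bad.add(n // d)
--             d += 1
--     i = 1
--     while i in bad:
--         i += 1
--     return i
-- ===== Notes on version B (the rewrite author's own statement) =====
-- stated objective: alternative
-- what changed: A tests each candidate step i against every obstacle (re-scanning the list per candidate); B precomputes the set of all divisors of each obstacle (trial division up to sqrt with the complementary divisor) once, then a single forward scan returns the first i not in that bad set.
import Mathlib
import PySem

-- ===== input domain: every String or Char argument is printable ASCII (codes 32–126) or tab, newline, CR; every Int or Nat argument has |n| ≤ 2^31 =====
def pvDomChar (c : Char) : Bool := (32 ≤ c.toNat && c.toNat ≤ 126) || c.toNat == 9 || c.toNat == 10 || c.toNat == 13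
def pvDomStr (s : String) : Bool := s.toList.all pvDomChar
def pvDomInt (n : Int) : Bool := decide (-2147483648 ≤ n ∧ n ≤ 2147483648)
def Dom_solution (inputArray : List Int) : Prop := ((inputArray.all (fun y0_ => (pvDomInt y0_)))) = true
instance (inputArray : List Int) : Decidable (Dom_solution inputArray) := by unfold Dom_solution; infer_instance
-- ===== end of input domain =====

-- B replaces A's per-candidate rescan of the obstacle list by a precomputed set of all obstacle
-- divisors plus one forward scan (objective: alternative decomposition, not measured faster).

-- ===== PORT A =====
-- A's 'while not found' loop; the Nat fuel is only a totality guard (under Pre_ it never runs out,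
-- see lemma solutionLoop_eq below).
def solutionLoop (inputArray : List Int) (i : Int) : Nat → Int
  | 0 => i
  | fuel+1 =>
    if inputArray.any (fun num => PySem.Int.mod num i == 0) then
      solutionLoop inputArray (i+1) fuel
    else i

def solution (inputArray : List Int) : Int :=
  solutionLoop inputArray 1 (inputArray.foldl (fun m num => max m num.natAbs) 0 + 1)

-- ===== PORT B =====
-- Source B's inner 'while d * d <= n' trial-division loop (fuel is a totality guard; it never runs out).
def divLoop (n : Int) (s : PySem.Set Int) (d : Int) : Nat → PySem.Set Int
  | 0 => s
  | fuel+1 =>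
    if d * d ≤ n then
      divLoop n
        (if PySem.Int.mod n d == 0 then
           PySem.Set.add (PySem.Set.add s d) (PySem.Int.floordiv n d)
         else s)
        (d + 1) fuel
    else s

-- Source B's 'for num in inputArray' loop building the bad set
def badSet (inputArray : List Int) : PySem.Set Int :=
  inputArray.foldl (fun s num => divLoop |num| s 1 (|num|.toNat + 1)) PySem.Set.empty

-- Source B's final 'while i in bad' scan (fuel again only a totality guard; it never runs out)
def scanLoop (bad : PySem.Set Int) (i : Int) : Nat → Int
  | 0 => i
  | fuel+1 => if PySem.Set.contains bad i then scanLoop bad (i+1) fuel else i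

def solution_alt (inputArray : List Int) : Int :=
  scanLoop (badSet inputArray) 1 (inputArray.foldl (fun m num => max m num.natAbs) 0 + 1)

-- ===== PRECONDITION & SPEC =====
-- A's while-loop never terminates when some obstacle is 0 (0 % i == 0 for every i), so A returns
-- on exactly the inputs without a 0; Pre_ excludes only those.
def Pre_solution (inputArray : List Int) : Prop := (0 : Int) ∉ inputArray
instance (inputArray : List Int) : Decidable (Pre_solution inputArray) := by unfold Pre_solution; infer_instance

def pvWitness_solution : List Int := [5, 3, 6, 7, 9]

def Spec_solution (inputArray : List Int) (out : Int) : Prop := out = solution_alt inputArray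
instance (inputArray : List Int) (out : Int) : Decidable (Spec_solution inputArray out) := by unfold Spec_solution; infer_instance

-- ===== CLAIM (what is proved, stated in full; the proofs are below) =====
def Claim_equal_solution : Prop := ∀ (inputArray : List Int), Dom_solution inputArray → Pre_solution inputArray → Spec_solution inputArray (solution inputArray)

-- ===== LEMMAS AND PROOFS =====

-- the candidate test of A's loop, as a predicate
def QA (xs : List Int) (k : Int) : Bool := xs.any (fun num => PySem.Int.mod num k == 0)

lemma qa_iff (xs : List Int) (k : Int) : QA xs k = true ↔ ∃ num ∈ xs, k ∣ num := by
  simp [QA, List.any_eq_true, PySem.Int.mod_eq_zero_iff_dvd]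

lemma le_foldlMaxAbs (xs : List Int) (m : Nat) :
    m ≤ xs.foldl (fun a n => max a n.natAbs) m := by
  induction xs generalizing m with
  | nil => simp
  | cons x t ih => exact le_trans (le_max_left _ _) (ih _)

lemma mem_le_foldlMaxAbs (xs : List Int) (num : Int) (h : num ∈ xs) (m : Nat) :
    num.natAbs ≤ xs.foldl (fun a n => max a n.natAbs) m := by
  induction xs generalizing m with
  | nil => cases h
  | cons x t ih =>
    rcases List.mem_cons.mp h with h | h
    · subst h; exact le_trans (le_max_right _ _) (le_foldlMaxAbs t _)
    · exact ih h _

lemma mem_divLoop (n i : Int) :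
    ∀ (fuel : Nat) (d : Int) (s : PySem.Set Int), 1 ≤ d → n < (d + fuel) * (d + fuel) →
      (i ∈ divLoop n s d fuel ↔
        i ∈ s ∨ ∃ e : Int, d ≤ e ∧ e * e ≤ n ∧ PySem.Int.mod n e = 0 ∧
          (i = e ∨ i = PySem.Int.floordiv n e)) := by
  intro fuel
  induction fuel with
  | zero =>
    intro d s hd hlt
    simp only [divLoop]
    constructor
    · intro h; exact Or.inl h
    · rintro (h | ⟨e, hde, hen, _, _⟩)
      · exact h
      · exfalso; push_cast at hlt; nlinarith
  | succ fuel ih =>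
    intro d s hd hlt
    by_cases hdd : d * d ≤ n
    · simp only [divLoop, if_pos hdd]
      rw [ih (d + 1) _ (by omega) (by push_cast at hlt ⊢; nlinarith)]
      by_cases hmod : PySem.Int.mod n d = 0
      · simp only [hmod, beq_self_eq_true, if_pos, PySem.Set.mem_add]
        constructor
        · rintro ((( h | h) | h) | ⟨e, he1, he2, he3, he4⟩)
          · exact Or.inl h
          · exact Or.inr ⟨d, le_refl d, hdd, hmod, Or.inl h⟩
          · exact Or.inr ⟨d, le_refl d, hdd, hmod, Or.inr h⟩
          · exact Or.inr ⟨e, by omega, he2, he3, he4⟩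
        · rintro (h | ⟨e, he1, he2, he3, he4⟩)
          · exact Or.inl (Or.inl (Or.inl h))
          · rcases eq_or_lt_of_le he1 with heq | hlt'
            · subst heq
              rcases he4 with h | h
              · exact Or.inl (Or.inl (Or.inr h))
              · exact Or.inl (Or.inr h)
            · exact Or.inr ⟨e, by omega, he2, he3, he4⟩
      · have : (PySem.Int.mod n d == 0) = false := by simpa using hmod
        simp only [this, Bool.false_eq_true]
        constructor
        · rintro (h | ⟨e, he1, he2, he3, he4⟩)
          · exact Or.inl h
          · exact Or.inr ⟨e, by omega, he2, he3, he4⟩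
        · rintro (h | ⟨e, he1, he2, he3, he4⟩)
          · exact Or.inl h
          · rcases eq_or_lt_of_le he1 with heq | hlt'
            · exact absurd (heq ▸ he3) hmod
            · exact Or.inr ⟨e, by omega, he2, he3, he4⟩
    · simp only [divLoop, if_neg hdd]
      constructor
      · intro h; exact Or.inl h
      · rintro (h | ⟨e, he1, he2, _, _⟩)
        · exact h
        · exfalso; nlinarith

-- divisor pairs up to the square root capture exactly the divisors (for n ≥ 1)
lemma divpair_iff (n i : Int) (hn : 1 ≤ n) :
    (∃ e : Int, 1 ≤ e ∧ e * e ≤ n ∧ PySem.Int.mod n e = 0 ∧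
      (i = e ∨ i = PySem.Int.floordiv n e)) ↔ (1 ≤ i ∧ i ∣ n) := by
  constructor
  · rintro ⟨e, he1, he2, he3, he4⟩
    have hdvd : e ∣ n := (PySem.Int.mod_eq_zero_iff_dvd n e).mp he3
    obtain ⟨c, hc⟩ := hdvd
    have hc1 : 1 ≤ c := by nlinarith
    rcases he4 with h | h
    · exact ⟨h ▸ he1, h ▸ ⟨c, hc⟩⟩
    · have : PySem.Int.floordiv n e = c := by
        rw [PySem.Int.floordiv_eq_ediv_of_pos (by omega), hc,
          Int.mul_ediv_cancel_left c (by omega)]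
      rw [h, this]
      exact ⟨hc1, ⟨e, by linarith [hc, mul_comm e c]⟩⟩
  · rintro ⟨hi1, hdvd⟩
    obtain ⟨c, hc⟩ := hdvd
    have hc1 : 1 ≤ c := by nlinarith
    by_cases hii : i * i ≤ n
    · exact ⟨i, hi1, hii, (PySem.Int.mod_eq_zero_iff_dvd n i).mpr ⟨c, hc⟩, Or.inl rfl⟩
    · refine ⟨c, hc1, by nlinarith, (PySem.Int.mod_eq_zero_iff_dvd n c).mpr ⟨i, by linarith [hc, mul_comm i c]⟩, Or.inr ?_⟩
      rw [PySem.Int.floordiv_eq_ediv_of_pos (by omega), hc, mul_comm i c,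
        Int.mul_ediv_cancel_left i (by omega)]

lemma mem_badSet (xs : List Int) (i : Int) :
    i ∈ badSet xs ↔ ∃ num ∈ xs, num ≠ 0 ∧ 1 ≤ i ∧ i ∣ num := by
  have key : ∀ (l : List Int) (s : PySem.Set Int),
      (i ∈ l.foldl (fun s num => divLoop |num| s 1 (|num|.toNat + 1)) s ↔
        i ∈ s ∨ ∃ num ∈ l, num ≠ 0 ∧ 1 ≤ i ∧ i ∣ num) := by
    intro l
    induction l with
    | nil => simp
    | cons x t ih =>
      intro s
      simp only [List.foldl_cons, ih, List.mem_cons]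
      rw [mem_divLoop |x| i (|x|.toNat + 1) 1 s (by omega)
        (by have := abs_nonneg x; push_cast; nlinarith [Int.toNat_of_nonneg (abs_nonneg x)])]
      by_cases hx : x = 0
      · subst hx
        simp only [abs_zero]
        constructor
        · rintro ((h | ⟨e, he1, he2, _, _⟩) | ⟨num, hnum, hne, hrest⟩)
          · exact Or.inl h
          · exfalso; nlinarith
          · exact Or.inr ⟨num, Or.inr hnum, hne, hrest⟩
        · rintro (h | ⟨num, (hnum | hnum), hne, hrest⟩)
          · exact Or.inl (Or.inl h)
          · exact absurd hnum.symm (hnum ▸ hne)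
          · exact Or.inr ⟨num, hnum, hne, hrest⟩
      · have habs : (1 : Int) ≤ |x| := by
          rcases lt_or_gt_of_ne hx with h | h <;> [skip; skip] <;> simp [abs_of_neg, abs_of_pos, h] <;> omega
        rw [divpair_iff |x| i habs]
        constructor
        · rintro ((h | ⟨h1, h2⟩) | ⟨num, hnum, hne, hrest⟩)
          · exact Or.inl h
          · exact Or.inr ⟨x, Or.inl rfl, hx, h1, (dvd_abs i x).mp h2⟩
          · exact Or.inr ⟨num, Or.inr hnum, hne, hrest⟩
        · rintro (h | ⟨num, (hnum | hnum), hne, h1, h2⟩)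
          · exact Or.inl (Or.inl h)
          · exact Or.inl (Or.inr ⟨h1, (dvd_abs i x).mpr (hnum ▸ h2)⟩)
          · exact Or.inr ⟨num, hnum, hne, h1, h2⟩
  simpa [badSet, PySem.Set.empty] using key xs []

-- A's loop returns the least good candidate whenever one lies within the fuel
lemma solutionLoop_eq (xs : List Int) :
    ∀ (fuel : Nat) (i j : Int), i ≤ j → QA xs j = false → j < i + fuel →
      (∀ k, i ≤ k → k < j → QA xs k = true) → solutionLoop xs i fuel = j := by
  intro fuel
  induction fuel with
  | zero => intro i j h1 _ h3 _; omega
  | succ fuel ih =>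
    intro i j h1 h2 h3 hmin
    rcases eq_or_lt_of_le h1 with heq | hlt
    · subst heq
      have : QA xs i = false := h2
      simp only [solutionLoop, QA] at this ⊢
      rw [this]
      simp
    · have hqa : QA xs i = true := hmin i (le_refl i) hlt
      simp only [solutionLoop, QA] at hqa ⊢
      rw [hqa]
      simp only [if_true]
      exact ih (i + 1) j (by omega) h2 (by omega) (fun k hk1 hk2 => hmin k (by omega) hk2)

-- B's final scan returns the least candidate not in the set, within the fuel
lemma scanLoop_eq (bad : PySem.Set Int) :
    ∀ (fuel : Nat) (i j : Int), i ≤ j → PySem.Set.contains bad j = false → j < i + fuel →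
      (∀ k, i ≤ k → k < j → PySem.Set.contains bad k = true) → scanLoop bad i fuel = j := by
  intro fuel
  induction fuel with
  | zero => intro i j h1 _ h3 _; omega
  | succ fuel ih =>
    intro i j h1 h2 h3 hmin
    rcases eq_or_lt_of_le h1 with heq | hlt
    · subst heq
      simp only [scanLoop]
      rw [h2]
      simp
    · simp only [scanLoop]
      rw [hmin i (le_refl i) hlt]
      simp only [if_true]
      exact ih (i + 1) j (by omega) h2 (by omega) (fun k hk1 hk2 => hmin k (by omega) hk2)

-- the two candidate tests agree on candidates ≥ 1 when no obstacle is 0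
lemma qa_eq_contains (xs : List Int) (hx : (0 : Int) ∉ xs) (k : Int) (hk : 1 ≤ k) :
    QA xs k = PySem.Set.contains (badSet xs) k := by
  rw [Bool.eq_iff_iff, qa_iff]
  have : PySem.Set.contains (badSet xs) k = true ↔ k ∈ badSet xs := by
    simp [PySem.Set.contains]
  rw [this, mem_badSet]
  constructor
  · rintro ⟨num, hnum, hdvd⟩
    exact ⟨num, hnum, fun h => hx (h ▸ hnum), hk, hdvd⟩
  · rintro ⟨num, hnum, _, _, hdvd⟩
    exact ⟨num, hnum, hdvd⟩

-- ===== VERDICT (by name: the statement is the Claim_ definition above) =====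
theorem solution_spec : Claim_equal_solution := by
  intro xs _ hpre
  unfold Spec_solution solution solution_alt
  set M : Nat := xs.foldl (fun m num => max m num.natAbs) 0 with hM
  have hgood : ∀ g : Int, (M : Int) < g → QA xs g = false := by
    intro g hg
    rw [Bool.eq_false_iff]
    intro hq
    obtain ⟨num, hnum, hdvd⟩ := (qa_iff xs g).mp hq
    have hne : num ≠ 0 := fun h => hpre (h ▸ hnum)
    have h1 : g ≤ |num| := Int.le_of_dvd (by positivity) ((dvd_abs g num).mpr hdvd)
    have h2 : num.natAbs ≤ M := mem_le_foldlMaxAbs xs num hnum 0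
    have : |num| = (num.natAbs : Int) := by exact_mod_cast (Int.abs_eq_natAbs num)
    omega
  have hPM : QA xs (1 + (M : Int)) = false := hgood _ (by omega)
  have hexists : ∃ m : Nat, QA xs (1 + (m : Int)) = false := ⟨M, hPM⟩
  set m₀ : Nat := Nat.find hexists with hm₀
  have hfind : QA xs (1 + (m₀ : Int)) = false := Nat.find_spec hexists
  have hm₀le : m₀ ≤ M := Nat.find_le hPM
  have hmin : ∀ k : Int, 1 ≤ k → k < 1 + (m₀ : Int) → QA xs k = true := by
    intro k hk1 hk2
    have hk : k = 1 + ((k - 1).toNat : Int) := by omega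
    have hlt : (k - 1).toNat < m₀ := by omega
    have := Nat.find_min hexists hlt
    rw [hk]
    exact Bool.not_eq_false _ |>.mp (by rw [← hk]; rw [hk]; exact this)
  set j : Int := 1 + (m₀ : Int) with hj
  rw [solutionLoop_eq xs (M + 1) 1 j (by omega) hfind (by omega) hmin]
  rw [scanLoop_eq (badSet xs) (M + 1) 1 j (by omega)
    (by rw [← qa_eq_contains xs hpre j (by omega)]; exact hfind) (by omega)
    (fun k hk1 hk2 => by rw [← qa_eq_contains xs hpre k hk1]; exact hmin k hk1 hk2)]
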